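-- pv_equiv track=rewrite | github.com/mfitz/knacktorle | movie_clues.py | make_movie_title_regex
-- ===== SOURCE A (Python) =====
-- def make_movie_title_regex(movie_title_pattern):
--     words = movie_title_pattern.split()
--     regex_pattern = ""
--     for index, word in enumerate(words):
--         regex_pattern += make_movie_title_word_regex(word)
--         if index != len(words) - 1:
--             regex_pattern += " "
--     regex_pattern += "$"
--     return regex_pattern
--
-- def make_movie_title_word_regex(movie_title_word):
--     alnum_character_count = 0
--     alnum_character_pattern = "\\w"
--     word_regex = ''
--     for character in movie_title_word:
--         if character.isalnum():
--             alnum_character_count += 1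
--         else:
--             if alnum_character_count != 0:
--                 word_regex += "{}{{{}}}".format(alnum_character_pattern, alnum_character_count)
--             word_regex += "\\{}".format(character)
--             alnum_character_count = 0
--     if alnum_character_count != 0:
--         word_regex += "{}{{{}}}".format(alnum_character_pattern, alnum_character_count)
--     return word_regex
-- ===== SOURCE B (Python) =====
-- def make_movie_title_regex(movie_title_pattern):
--     return ' '.join(_word_regex(w) for w in movie_title_pattern.split()) + '$'
--
-- def _word_regex(word):
--     pieces = []
--     i = 0
--     n = len(word)
--     while i < n:
--         j = i
--         if word[i].isalnum():
--             while j < n and word[j].isalnum():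
--                 j += 1
--             pieces.append('\\w{%d}' % (j - i))
--         else:
--             while j < n and not word[j].isalnum():
--                 j += 1
--             pieces.extend('\\' + c for c in word[i:j])
--         i = j
--     return ''.join(pieces)
-- ===== Notes on version B (the rewrite author's own statement) =====
-- stated objective: idiomatic
-- what changed: Replaces the per-character counter/flush loop with a two-pointer scan over maximal alnum/non-alnum runs per word, and joins the word regexes with str.join on a single space instead of an index-checked accumulator.
import Mathlib
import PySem

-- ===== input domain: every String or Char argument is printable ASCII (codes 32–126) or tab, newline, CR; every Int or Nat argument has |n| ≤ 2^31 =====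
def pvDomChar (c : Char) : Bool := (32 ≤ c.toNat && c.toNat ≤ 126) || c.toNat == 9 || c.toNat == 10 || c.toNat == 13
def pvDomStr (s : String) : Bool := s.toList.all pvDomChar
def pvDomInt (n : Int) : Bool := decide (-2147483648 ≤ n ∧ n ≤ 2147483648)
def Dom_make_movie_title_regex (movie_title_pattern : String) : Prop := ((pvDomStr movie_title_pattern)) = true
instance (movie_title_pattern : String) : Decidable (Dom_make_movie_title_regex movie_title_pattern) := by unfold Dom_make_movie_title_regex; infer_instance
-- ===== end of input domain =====

-- B is the same task written the idiomatic way: per-word maximal alnum/non-alnum runs via a two-pointer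
-- scan (no running counter / flush sites), joined with ' '.join; return values proved equal on Dom.

-- "\\w{<n>}" as a list of chars (the '{}{{{}}}'.format / '%d' piece, identical text in both Pythons)
def fmtCount (n : Nat) : List Char := '\\' :: 'w' :: '{' :: PySem.Int.toChars (n : Int) ++ ['}']

-- ===== PORT A =====
-- A's inner loop: state = (alnum_character_count, word_regex accumulator)
def wordA : List Char → Nat → List Char → List Char
  | [], cnt, acc => if cnt ≠ 0 then acc ++ fmtCount cnt else acc
  | c :: cs, cnt, acc =>
      if PySem.Chars.isalnum c then wordA cs (cnt + 1) acc
      else wordA cs 0 ((if cnt ≠ 0 then acc ++ fmtCount cnt else acc) ++ ['\\', c])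

-- A's outer loop: 'for index, word in enumerate(words)' with the 'index != len(words)-1' space test
def loopA (n : Nat) : List String → Nat → List Char → List Char
  | [], _, acc => acc
  | w :: ws, idx, acc =>
      loopA n ws (idx + 1) (acc ++ wordA w.toList 0 [] ++ (if idx ≠ n - 1 then [' '] else []))

def make_movie_title_regex (movie_title_pattern : String) : String :=
  let words := PySem.Str.split₀ movie_title_pattern
  String.ofList (loopA words.length words 0 [] ++ ['$'])

-- ===== PORT B =====
-- B's inner 'while j < n and …' : take the maximal run with the same isalnum value as the head
def takeRun (b : Bool) : List Char → List Char × List Char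
  | [] => ([], [])
  | c :: cs =>
      if PySem.Chars.isalnum c = b then
        let p := takeRun b cs
        (c :: p.1, p.2)
      else ([], c :: cs)

theorem takeRun_length_le (b : Bool) : ∀ cs : List Char, (takeRun b cs).2.length ≤ cs.length := by
  intro cs
  induction cs with
  | nil => simp [takeRun]
  | cons c cs ih =>
      simp only [takeRun]
      split
      · simpa using Nat.le_succ_of_le ih
      · simp

-- B's outer while loop over one word: one piece per run
def wordB (cs : List Char) : List Char :=
  match cs with
  | [] => []
  | c :: rest =>
      let b := PySem.Chars.isalnum c
      let p := takeRun b rest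
      (if b then fmtCount (p.1.length + 1) else (c :: p.1).flatMap (fun d => ['\\', d])) ++ wordB p.2
termination_by cs.length
decreasing_by
  have := takeRun_length_le (PySem.Chars.isalnum c) rest
  simp only [List.length_cons]
  omega

def make_movie_title_regex_alt (movie_title_pattern : String) : String :=
  String.ofList
    (PySem.Chars.join [' ']
      ((PySem.Str.split₀ movie_title_pattern).map (fun w => wordB w.toList)) ++ ['$'])

-- ===== PRECONDITION & SPEC =====
def Spec_make_movie_title_regex (movie_title_pattern : String) (out : String) : Prop := out = make_movie_title_regex_alt movie_title_pattern
instance (movie_title_pattern : String) (out : String) : Decidable (Spec_make_movie_title_regex movie_title_pattern out) := by unfold Spec_make_movie_title_regex; infer_instance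

-- ===== CLAIM (what is proved, stated in full; the proofs are below) =====
def Claim_equal_make_movie_title_regex : Prop := ∀ (movie_title_pattern : String), Dom_make_movie_title_regex movie_title_pattern → Spec_make_movie_title_regex movie_title_pattern (make_movie_title_regex movie_title_pattern)

-- ===== LEMMAS AND PROOFS =====

theorem wordA_eq : ∀ cs cnt acc, wordA cs cnt acc = acc ++ wordA cs cnt [] := by
  intro cs
  induction cs with
  | nil => intro cnt acc; simp [wordA]; split_ifs <;> simp
  | cons c cs ih =>
      intro cnt acc
      simp only [wordA]
      split
      · exact ih _ _
      · rw [ih _ ((if cnt ≠ 0 then acc ++ fmtCount cnt else acc) ++ ['\\', c]),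
            ih _ ((if cnt ≠ 0 then [] ++ fmtCount cnt else []) ++ ['\\', c])]
        split_ifs <;> simp

theorem takeRun_append (b : Bool) : ∀ cs : List Char, (takeRun b cs).1 ++ (takeRun b cs).2 = cs := by
  intro cs
  induction cs with
  | nil => simp [takeRun]
  | cons c cs ih =>
      simp only [takeRun]
      split
      · simpa using ih
      · simp

theorem takeRun_mem (b : Bool) : ∀ cs : List Char, ∀ c ∈ (takeRun b cs).1, PySem.Chars.isalnum c = b := by
  intro cs
  induction cs with
  | nil => simp [takeRun]
  | cons c cs ih =>
      simp only [takeRun]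
      split
      · intro d hd
        simp only [List.mem_cons] at hd
        rcases hd with h | h
        · subst h; assumption
        · exact ih d h
      · simp

theorem wordA_run : ∀ (cs : List Char) (cnt : Nat),
    wordA cs cnt [] =
      (if cnt + (takeRun true cs).1.length ≠ 0 then fmtCount (cnt + (takeRun true cs).1.length) else []) ++
        wordA (takeRun true cs).2 0 [] := by
  intro cs
  induction cs with
  | nil => intro cnt; simp [takeRun, wordA]
  | cons c cs ih =>
      intro cnt
      by_cases h : PySem.Chars.isalnum c = true
      · simp only [wordA, takeRun, h]
        rw [ih (cnt + 1)]
        simp only [if_true, List.length_cons]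
        have e : cnt + 1 + (takeRun true cs).1.length = cnt + ((takeRun true cs).1.length + 1) := by omega
        rw [e]
      · simp only [wordA, takeRun, h]
        have hstep : wordA (c :: cs) 0 [] = ['\\', c] ++ wordA cs 0 [] := by
          simp only [wordA, h, Bool.false_eq_true, if_false]
          rw [wordA_eq]
          simp
        simp only [Bool.false_eq_true, if_false, List.length_nil, Nat.add_zero]
        rw [hstep]
        split_ifs <;> rw [wordA_eq] <;> simp

theorem wordA_escape : ∀ (r rest : List Char), (∀ c ∈ r, PySem.Chars.isalnum c = false) →
    wordA (r ++ rest) 0 [] = r.flatMap (fun d => ['\\', d]) ++ wordA rest 0 [] := by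
  intro r
  induction r with
  | nil => intro rest _; simp
  | cons c r ih =>
      intro rest h
      have hc : PySem.Chars.isalnum c = false := h c (by simp)
      simp only [List.cons_append, wordA, hc, Bool.false_eq_true, if_false]
      rw [wordA_eq, ih rest (fun d hd => h d (by simp [hd]))]
      simp

theorem wordA_eq_wordB : ∀ cs, wordA cs 0 [] = wordB cs := by
  suffices H : ∀ (n : Nat) (cs : List Char), cs.length ≤ n → wordA cs 0 [] = wordB cs from
    fun cs => H cs.length cs le_rfl
  intro n
  induction n with
  | zero =>
      intro cs hcs
      have : cs = [] := List.length_eq_zero_iff.mp (Nat.le_zero.mp hcs)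
      subst this
      simp [wordA, wordB]
  | succ n ih =>
      intro cs hcs
      match cs with
      | [] => simp [wordA, wordB]
      | c :: rest =>
          rw [wordB]
          by_cases h : PySem.Chars.isalnum c = true
          · simp only [wordA, h, if_true]
            rw [wordA_run rest 1]
            have hlen : (takeRun true rest).2.length ≤ n := by
              have := takeRun_length_le true rest
              simp only [List.length_cons] at hcs
              omega
            rw [ih _ hlen, if_pos (by omega), Nat.add_comm 1 _]
          · have hb : PySem.Chars.isalnum c = false := by simpa using h
            simp only [wordA, hb, Bool.false_eq_true, if_false]
            rw [wordA_eq]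
            have key : wordA rest 0 [] =
                List.flatMap (fun d => ['\\', d]) (takeRun false rest).1 ++ wordB (takeRun false rest).2 := by
              conv_lhs => rw [← takeRun_append false rest]
              rw [wordA_escape _ _ (takeRun_mem false rest)]
              have hlen : (takeRun false rest).2.length ≤ n := by
                have := takeRun_length_le false rest
                simp only [List.length_cons] at hcs
                omega
              rw [ih _ hlen]
            rw [key]
            simp

theorem loopA_run : ∀ (ws : List String) (n idx : Nat) (acc : List Char),
    idx + ws.length = n → ws ≠ [] →
    loopA n ws idx acc = acc ++ PySem.Chars.join [' '] (ws.map (fun w => wordB w.toList)) := by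
  intro ws
  induction ws with
  | nil => intro n idx acc _ h; exact absurd rfl h
  | cons w ws ih =>
      intro n idx acc hlen _
      cases ws with
      | nil =>
          have hidx : idx = n - 1 := by simp only [List.length_cons, List.length_nil] at hlen; omega
          have step : loopA n [w] idx acc =
              loopA n [] (idx + 1) (acc ++ wordA w.toList 0 [] ++ (if idx ≠ n - 1 then [' '] else [])) := rfl
          rw [step, if_neg (by simp [hidx])]
          simp [loopA, PySem.Chars.join_singleton, ← wordA_eq_wordB]
      | cons w' ws' =>
          have hne : idx ≠ n - 1 := by simp only [List.length_cons] at hlen; omega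
          have step : loopA n (w :: w' :: ws') idx acc =
              loopA n (w' :: ws') (idx + 1) (acc ++ wordA w.toList 0 [] ++ (if idx ≠ n - 1 then [' '] else [])) := rfl
          rw [step, if_pos hne, ih n (idx + 1) _ (by simp only [List.length_cons] at hlen ⊢; omega) (by simp)]
          simp [PySem.Chars.join_cons_cons, ← wordA_eq_wordB]

theorem loopA_eq_join : ∀ ws, loopA ws.length ws 0 [] =
    PySem.Chars.join [' '] (ws.map (fun w => wordB w.toList)) := by
  intro ws
  cases ws with
  | nil => simp [loopA, PySem.Chars.join_nil]
  | cons w ws => simpa using loopA_run (w :: ws) (w :: ws).length 0 [] (by simp) (by simp)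

-- ===== VERDICT (by name: the statement is the Claim_ definition above) =====
theorem make_movie_title_regex_spec : Claim_equal_make_movie_title_regex := by
  intro s _
  simp only [Spec_make_movie_title_regex, make_movie_title_regex, make_movie_title_regex_alt,
    loopA_eq_join]
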